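-- pv_equiv track=rewrite | github.com/Enjef/Algo | 2100 - 2199/2148 - Count Elements With Strictly Smaller and Greater Elements/2148 - Count Elements With Strictly Smaller and Greater Elements.py | countElements_3d_best_speed
-- ===== SOURCE A (Python) =====
-- from typing import List
--
-- def countElements_3d_best_speed(nums: List[int]) -> int:
--     min_num = min(nums)
--     max_num = max(nums)
--     min_occurences = 0
--     max_occurences = 0
--     for num in nums:
--         if num < min_num:
--             min_num = num
--             min_occurences = 1
--         elif num > max_num:
--             max_num = num
--             max_occurences = 1
--         elif num == min_num:
--             min_occurences += 1
--         elif num == max_num: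
--             max_occurences += 1
--     return max(0, len(nums) - min_occurences - max_occurences)
-- ===== SOURCE B (Python) =====
-- def countElements_3d_best_speed(nums):
--     mn = min(nums)
--     mx = max(nums)
--     return sum(1 for x in nums if mn < x < mx)
-- ===== Notes on version B (the rewrite author's own statement) =====
-- stated objective: simpler
-- what changed: B counts the elements strictly between min and max directly with one generator sum, instead of A's running-min/max loop counting the occurrences of the extremes and subtracting them from the length with a clamp.
import Mathlib
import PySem

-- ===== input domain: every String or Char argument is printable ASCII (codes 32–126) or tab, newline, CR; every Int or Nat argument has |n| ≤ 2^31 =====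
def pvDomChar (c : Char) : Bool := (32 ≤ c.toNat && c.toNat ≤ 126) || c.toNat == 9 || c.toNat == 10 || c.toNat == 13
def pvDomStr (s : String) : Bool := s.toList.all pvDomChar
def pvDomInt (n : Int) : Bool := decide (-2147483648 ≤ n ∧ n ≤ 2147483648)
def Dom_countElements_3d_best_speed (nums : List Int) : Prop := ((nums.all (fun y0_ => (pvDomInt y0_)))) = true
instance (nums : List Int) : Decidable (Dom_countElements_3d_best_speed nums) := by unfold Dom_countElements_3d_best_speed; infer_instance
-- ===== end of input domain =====

-- B counts the elements strictly between min and max directly; A counts occurrences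
-- of the extremes with a running-min/max loop and subtracts them from the length.
-- Objective: simpler. Equivalence proved on all non-empty lists (both raise on []).


-- ===== PORT A =====
-- one fold step of A's for-loop over state (min_num, max_num, min_occurences, max_occurences)
def pvStepA (st : Int × Int × Int × Int) (num : Int) : Int × Int × Int × Int :=
  let (mn, mx, mo, xo) := st
  if num < mn then (num, mx, 1, xo)
  else if num > mx then (mn, num, mo, 1)
  else if num == mn then (mn, mx, mo + 1, xo)
  else if num == mx then (mn, mx, mo, xo + 1)
  else (mn, mx, mo, xo)

def countElements_3d_best_speed (nums : List Int) : Int :=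
  match PySem.List.min? nums (fun x => x), PySem.List.max? nums (fun x => x) with
  | some min_num, some max_num =>
    let s := nums.foldl pvStepA (min_num, max_num, 0, 0)
    max 0 ((nums.length : Int) - s.2.2.1 - s.2.2.2)
  | _, _ => 0   -- unreachable: Python's min raises on [], excluded by Pre_

-- ===== PORT B =====
def countElements_3d_best_speed_alt (nums : List Int) : Int :=
  match PySem.List.min? nums (fun x => x) with
  | none => 0   -- unreachable: Python's min raises on [], excluded by Pre_
  | some mn =>
    match PySem.List.max? nums (fun x => x) with
    | none => 0
    | some mx =>
      ((nums.filter (fun x => decide (mn < x) && decide (x < mx))).map (fun _ => (1 : Int))).sum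

-- ===== PRECONDITION & SPEC =====
-- Pre_ excludes only the empty list, on which both A's and B's min() raise ValueError.
def Pre_countElements_3d_best_speed (nums : List Int) : Prop := nums ≠ []
instance (nums : List Int) : Decidable (Pre_countElements_3d_best_speed nums) := by unfold Pre_countElements_3d_best_speed; infer_instance
def pvWitness_countElements_3d_best_speed : List Int := [1, 2, 3]

def Spec_countElements_3d_best_speed (nums : List Int) (out : Int) : Prop := out = countElements_3d_best_speed_alt nums
instance (nums : List Int) (out : Int) : Decidable (Spec_countElements_3d_best_speed nums out) := by unfold Spec_countElements_3d_best_speed; infer_instance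

-- ===== CLAIM (what is proved, stated in full; the proofs are below) =====
def Claim_equal_countElements_3d_best_speed : Prop := ∀ (nums : List Int), Dom_countElements_3d_best_speed nums → Pre_countElements_3d_best_speed nums → Spec_countElements_3d_best_speed nums (countElements_3d_best_speed nums)

-- ===== LEMMAS AND PROOFS =====

-- A's loop never sees an element below min_num or above max_num, so the fold only
-- counts: min_occurences = #(= mn), max_occurences = #(= mx) unless mn = mx (then 0).
theorem pvFoldA_char (l : List Int) (mn mx : Int) (mo xo : Int)
    (h : ∀ x ∈ l, mn ≤ x ∧ x ≤ mx) :
    l.foldl pvStepA (mn, mx, mo, xo) =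
      (mn, mx, mo + (l.countP (fun x => decide (x = mn)) : Int),
        xo + (if mn = mx then 0 else (l.countP (fun x => decide (x = mx)) : Int))) := by
  induction l generalizing mo xo with
  | nil => simp
  | cons a t ih =>
    have ha := h a (by simp)
    have ht : ∀ x ∈ t, mn ≤ x ∧ x ≤ mx := fun x hx => h x (by simp [hx])
    simp only [List.foldl_cons, pvStepA]
    have h1 : ¬ a < mn := by omega
    have h2 : ¬ a > mx := by omega
    by_cases hamn : a = mn
    · subst hamn
      by_cases hmm : a = mx
      · simp only [h1, h2, if_false, beq_self_eq_true, if_true, ih _ _ ht]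
        simp [List.countP_cons, hmm]; try ring
      · simp only [h1, h2, if_false, beq_self_eq_true, if_true, ih _ _ ht]
        simp [List.countP_cons, hmm]; try ring
    · by_cases hamx : a = mx
      · have hmm : ¬ mn = mx := by omega
        subst hamx
        simp only [h1, h2, if_false, beq_iff_eq, hamn, beq_self_eq_true, if_true, ih _ _ ht]
        simp [List.countP_cons, hamn, hmm]; try ring
      · simp only [h1, h2, if_false, beq_iff_eq, hamn, hamx, ih _ _ ht]
        simp [List.countP_cons, hamn, hamx]; try ring

-- length splits into the three disjoint classes (= mn), (= mx), strictly between, when mn ≠ mx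
theorem pvLen_split (l : List Int) (mn mx : Int) (hne : mn ≠ mx)
    (h : ∀ x ∈ l, mn ≤ x ∧ x ≤ mx) :
    (l.length : Int) =
      (l.countP (fun x => decide (x = mn)) : Int) +
      (l.countP (fun x => decide (x = mx)) : Int) +
      (l.countP (fun x => decide (mn < x) && decide (x < mx)) : Int) := by
  induction l with
  | nil => simp
  | cons a t ih =>
    have ha := h a (by simp)
    have ht : ∀ x ∈ t, mn ≤ x ∧ x ≤ mx := fun x hx => h x (by simp [hx])
    have := ih ht
    by_cases h1 : a = mn
    · simp [List.countP_cons, h1, hne, show ¬ mn < mn by omega]; push_cast; omega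
    · by_cases h2 : a = mx
      · simp [List.countP_cons, h1, h2, show ¬ mx < mx by omega]; push_cast; omega
      · simp [List.countP_cons, h1, h2, show mn < a by omega, show a < mx by omega]
        push_cast; omega

-- ===== VERDICT (by name: the statement is the Claim_ definition above) =====
theorem countElements_3d_best_speed_spec : Claim_equal_countElements_3d_best_speed := by
  intro nums _ hpre
  unfold Spec_countElements_3d_best_speed countElements_3d_best_speed countElements_3d_best_speed_alt
  obtain ⟨mn, hmn⟩ := Option.ne_none_iff_exists'.mp
    (by simpa [PySem.List.min?_eq_none_iff] using hpre :
      PySem.List.min? nums (fun x => x) ≠ none)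
  obtain ⟨mx, hmx⟩ := Option.ne_none_iff_exists'.mp
    (by simpa [PySem.List.max?_eq_none_iff] using hpre :
      PySem.List.max? nums (fun x => x) ≠ none)
  rw [hmn, hmx]
  dsimp only
  have hbnd : ∀ x ∈ nums, mn ≤ x ∧ x ≤ mx := fun x hx =>
    ⟨PySem.List.min?_isMin hmn x hx, PySem.List.max?_isMax hmx x hx⟩
  rw [pvFoldA_char nums mn mx 0 0 hbnd]
  have hsum : ((nums.filter (fun x => decide (mn < x) && decide (x < mx))).map
      (fun _ => (1 : Int))).sum = (nums.countP (fun x => decide (mn < x) && decide (x < mx)) : Int) := by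
    simp [List.countP_eq_length_filter, List.map_const', List.sum_replicate, smul_eq_mul]
  rw [hsum]
  by_cases heq : mn = mx
  · -- all elements equal mn: between-count is 0 and A's clamp yields 0
    subst heq
    have hc0 : nums.countP (fun x => decide (mn < x) && decide (x < mn)) = 0 := by
      rw [List.countP_eq_zero]
      intro x hx; simp; omega
    have hcall : nums.countP (fun x => decide (x = mn)) = nums.length := by
      rw [List.countP_eq_length]
      intro x hx
      have := hbnd x hx; simp; omega
    simp [hcall, hc0]
  · have := pvLen_split nums mn mx heq hbnd
    simp only [heq, if_false]
    have hnn : (0 : Int) ≤ (nums.countP (fun x => decide (mn < x) && decide (x < mx)) : Int) := by positivity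
    omega
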